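-- pv_equiv track=rewrite | github.com/PabloC-c/Tesis | functions.py | create_edges_p
-- ===== SOURCE A (Python) =====
-- def create_edges_p(partition,n_input,n_neurons,n_layers):
--     ## Lista para guardar las aristas
--     edges_p = []
--     ## Se recorren las particiones
--     for k in range(len(partition)):
--         ## Se recorren las duplas de la particion
--         for (l,i) in partition[k]:
--             ## Para las capas posteiores a la entrada
--             if l > -1:
--                 ## Neuronas de la capa anterior
--                 n = n_neurons
--                 ## Caso primer capa oculta
--                 if l == 0:
--                     n = n_input
--                 ## Se recorren las neuronas de la capa anterior
--                 for j in range(n):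
--                     ## Si la neurona no se encuentra en la misma particion
--                     if not (l-1,j) in partition[k]:
--                         ## Se agrega la arista
--                         edges_p.append((l,i,j))
--     return edges_p
-- ===== SOURCE B (Python) =====
-- def create_edges_p(partition, n_input, n_neurons, n_layers):
--     edges_p = []
--     for block in partition:
--         ## membership test hoisted: set of the block's (layer, idx) pairs
--         block_set = set(block)
--         ## per-layer table of allowed predecessor indices, computed once per layer
--         allowed = {}
--         for (l, _i) in block:
--             if l > -1 and l not in allowed:
--                 n = n_input if l == 0 else n_neurons
--                 allowed[l] = [j for j in range(n) if (l - 1, j) not in block_set]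
--         for (l, i) in block:
--             if l > -1:
--                 for j in allowed[l]:
--                     edges_p.append((l, i, j))
--     return edges_p
-- ===== Notes on version B (the rewrite author's own statement) =====
-- stated objective: alternative
-- what changed: Per block, B builds a set of the block's pairs and precomputes one allowed-predecessor list per layer, then emits edges by iterating those lists, instead of re-scanning the block list for every (node, predecessor) pair.
import Mathlib
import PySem

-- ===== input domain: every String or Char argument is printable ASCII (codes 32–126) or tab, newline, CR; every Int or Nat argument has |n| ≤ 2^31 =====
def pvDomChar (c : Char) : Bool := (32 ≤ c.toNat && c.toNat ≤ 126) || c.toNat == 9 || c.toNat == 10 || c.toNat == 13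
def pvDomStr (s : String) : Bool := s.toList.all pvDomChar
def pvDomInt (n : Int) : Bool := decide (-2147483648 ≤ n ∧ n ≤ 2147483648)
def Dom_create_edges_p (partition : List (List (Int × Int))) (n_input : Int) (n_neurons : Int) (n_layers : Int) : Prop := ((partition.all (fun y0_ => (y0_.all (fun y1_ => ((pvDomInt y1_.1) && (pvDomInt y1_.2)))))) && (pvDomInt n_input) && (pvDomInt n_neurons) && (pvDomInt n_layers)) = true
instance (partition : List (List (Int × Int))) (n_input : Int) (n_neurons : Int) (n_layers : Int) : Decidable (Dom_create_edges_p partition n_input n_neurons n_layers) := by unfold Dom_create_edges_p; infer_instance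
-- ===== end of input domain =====

-- B hoists the per-node membership scan into one per-layer allowed list (built once per block
-- over a set of the block's pairs); same return value by a different decomposition.

-- ===== PORT A =====
-- literal transliteration: 'for k in range(len(partition))' indexes partition[k] (always in
-- range, so pyGetD's default [] is never used); inner loops and branch order as in A.
def create_edges_p (partition : List (List (Int × Int))) (n_input : Int) (n_neurons : Int) (n_layers : Int) : List (Int × Int × Int) :=
  (PySem.List.pyRange 0 (partition.length : Int) 1).foldl (fun edges_p k =>
    (PySem.List.pyGetD partition k []).foldl (fun edges_p li =>
      if li.1 > -1 then
        -- n = n_neurons; if l == 0: n = n_input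
        (PySem.List.pyRange 0 (if li.1 = 0 then n_input else n_neurons) 1).foldl (fun edges_p j =>
          if (li.1 - 1, j) ∉ PySem.List.pyGetD partition k [] then edges_p ++ [(li.1, li.2, j)]
          else edges_p) edges_p
      else edges_p) edges_p) []

-- ===== PORT B =====
-- [j for j in range(n_input if l == 0 else n_neurons) if (l-1, j) not in block_set]
def pvAllowed (n_input n_neurons : Int) (block_set : List (Int × Int)) (l : Int) : List Int :=
  (PySem.List.pyRange 0 (if l = 0 then n_input else n_neurons) 1).filter
    (fun j => !(PySem.Set.contains block_set (l - 1, j)))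

-- the first loop of B: fills the per-layer table 'allowed'
def pvBuild (n_input n_neurons : Int) (block_set : List (Int × Int)) (block : List (Int × Int)) (allowed : PySem.Dict Int (List Int)) : PySem.Dict Int (List Int) :=
  block.foldl (fun allowed li =>
    if li.1 > -1 ∧ allowed.contains li.1 = false then
      allowed.insert li.1 (pvAllowed n_input n_neurons block_set li.1)
    else allowed) allowed

def create_edges_p_alt (partition : List (List (Int × Int))) (n_input : Int) (n_neurons : Int) (n_layers : Int) : List (Int × Int × Int) :=
  partition.foldl (fun edges_p block =>
    let block_set : PySem.Set (Int × Int) := PySem.Set.ofList block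
    let allowed := pvBuild n_input n_neurons block_set block PySem.Dict.empty
    block.foldl (fun edges_p li =>
      if li.1 > -1 then
        -- allowed[li.1] always exists here (built from the same block), so getD's [] is never used
        edges_p ++ (allowed.getD li.1 []).map (fun j => (li.1, li.2, j))
      else edges_p) edges_p) []

-- ===== PRECONDITION & SPEC =====
def Spec_create_edges_p (partition : List (List (Int × Int))) (n_input : Int) (n_neurons : Int) (n_layers : Int) (out : List (Int × Int × Int)) : Prop := out = create_edges_p_alt partition n_input n_neurons n_layers
instance (partition : List (List (Int × Int))) (n_input : Int) (n_neurons : Int) (n_layers : Int) (out : List (Int × Int × Int)) : Decidable (Spec_create_edges_p partition n_input n_neurons n_layers out) := by unfold Spec_create_edges_p; infer_instance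

-- ===== CLAIM (what is proved, stated in full; the proofs are below) =====
def Claim_equal_create_edges_p : Prop := ∀ (partition : List (List (Int × Int))) (n_input : Int) (n_neurons : Int) (n_layers : Int), Dom_create_edges_p partition n_input n_neurons n_layers → Spec_create_edges_p partition n_input n_neurons n_layers (create_edges_p partition n_input n_neurons n_layers)

-- ===== LEMMAS AND PROOFS =====

-- the dict built by pvBuild only ever stores pvAllowed values
lemma pvBuild_inv (ni nn : Int) (bs blk : List (Int × Int)) (d : PySem.Dict Int (List Int))
    (hd : ∀ l v, d.get? l = some v → v = pvAllowed ni nn bs l) :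
    ∀ l v, (pvBuild ni nn bs blk d).get? l = some v → v = pvAllowed ni nn bs l := by
  induction blk generalizing d with
  | nil => exact hd
  | cons x t ih =>
    simp only [pvBuild, List.foldl_cons]
    apply ih
    split_ifs with h
    · intro l v hv
      rw [PySem.Dict.get?_insert] at hv
      split_ifs at hv with he
      · cases hv; rw [he]
      · exact hd l v hv
    · exact hd

-- contains is monotone through pvBuild
lemma pvBuild_contains_mono (ni nn : Int) (bs blk : List (Int × Int)) (d : PySem.Dict Int (List Int))
    (k : Int) (hk : d.contains k = true) :
    (pvBuild ni nn bs blk d).contains k = true := by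
  induction blk generalizing d with
  | nil => exact hk
  | cons x t ih =>
    simp only [pvBuild, List.foldl_cons]
    apply ih
    split_ifs with h
    · simp [PySem.Dict.contains_insert, hk]
    · exact hk

-- every layer l > -1 occurring in blk ends up as a key
lemma pvBuild_contains (ni nn : Int) (bs blk : List (Int × Int)) (d : PySem.Dict Int (List Int))
    (li : Int × Int) (hmem : li ∈ blk) (hl : li.1 > -1) :
    (pvBuild ni nn bs blk d).contains li.1 = true := by
  induction blk generalizing d with
  | nil => cases hmem
  | cons x t ih =>
    simp only [pvBuild, List.foldl_cons]
    rcases List.mem_cons.mp hmem with rfl | hmem'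
    · by_cases hc : d.contains li.1 = false
      · rw [if_pos ⟨hl, hc⟩]
        exact pvBuild_contains_mono ni nn bs t _ li.1 (PySem.Dict.contains_insert_self _ _ _)
      · have : d.contains li.1 = true := by revert hc; cases d.contains li.1 <;> simp
        split_ifs with h
        · exact pvBuild_contains_mono ni nn bs t _ li.1 (PySem.Dict.contains_insert_self _ _ _)
        · exact pvBuild_contains_mono ni nn bs t _ li.1 this
    · split_ifs with h
      · exact ih _ hmem'
      · exact ih _ hmem'

-- lookup of a present layer gives exactly its allowed list
lemma pvBuild_getD (ni nn : Int) (bs blk : List (Int × Int))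
    (li : Int × Int) (hmem : li ∈ blk) (hl : li.1 > -1) :
    (pvBuild ni nn bs blk PySem.Dict.empty).getD li.1 [] = pvAllowed ni nn bs li.1 := by
  have hc := pvBuild_contains ni nn bs blk PySem.Dict.empty li hmem hl
  rw [PySem.Dict.contains_eq_isSome_get?] at hc
  obtain ⟨v, hv⟩ := Option.isSome_iff_exists.mp hc
  have hval := pvBuild_inv ni nn bs blk PySem.Dict.empty
    (by intro l v h; simp [PySem.Dict.get?_empty] at h) li.1 v hv
  rw [PySem.Dict.getD_eq_get?_getD, hv, hval]; rfl

-- A's inner scan over range(n) with a 'not in block' test IS the precomputed allowed list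
lemma inner_eq (ni nn : Int) (blk : List (Int × Int)) (l i : Int) (acc : List (Int × Int × Int)) :
    (PySem.List.pyRange 0 (if l = 0 then ni else nn) 1).foldl (fun edges_p j =>
        if (l - 1, j) ∉ blk then edges_p ++ [(l, i, j)] else edges_p) acc
      = acc ++ (pvAllowed ni nn (PySem.Set.ofList blk) l).map (fun j => (l, i, j)) := by
  rw [PySem.List.foldl_append_ite (p := fun j => (l - 1, j) ∉ blk) (f := fun j => (l, i, j))]
  unfold pvAllowed
  congr 1
  apply congrArg
  apply List.filter_congr
  intro j _
  simp [PySem.Set.contains, PySem.Set.mem_ofList]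

-- A's per-block loop equals B's per-block loop
lemma block_eq (ni nn : Int) (blk : List (Int × Int)) (acc : List (Int × Int × Int)) :
    blk.foldl (fun edges_p li =>
        if li.1 > -1 then
          (PySem.List.pyRange 0 (if li.1 = 0 then ni else nn) 1).foldl (fun edges_p j =>
            if (li.1 - 1, j) ∉ blk then edges_p ++ [(li.1, li.2, j)] else edges_p) edges_p
        else edges_p) acc
      = blk.foldl (fun edges_p li =>
          if li.1 > -1 then
            edges_p ++ ((pvBuild ni nn (PySem.Set.ofList blk) blk PySem.Dict.empty).getD li.1 []).map
              (fun j => (li.1, li.2, j))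
          else edges_p) acc := by
  apply PySem.List.foldl_congr_mem
  intro a li hmem
  by_cases h : li.1 > -1
  · rw [if_pos h, if_pos h, inner_eq, pvBuild_getD ni nn (PySem.Set.ofList blk) blk li hmem h]
  · rw [if_neg h, if_neg h]

-- ===== VERDICT (by name: the statement is the Claim_ definition above) =====
theorem create_edges_p_spec : Claim_equal_create_edges_p := by
  intro partition n_input n_neurons n_layers _
  unfold Spec_create_edges_p create_edges_p create_edges_p_alt
  rw [PySem.List.foldl_pyRange_zero_pyGetD' partition []
    (fun edges_p blk => blk.foldl (fun edges_p li =>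
      if li.1 > -1 then
        (PySem.List.pyRange 0 (if li.1 = 0 then n_input else n_neurons) 1).foldl (fun edges_p j =>
          if (li.1 - 1, j) ∉ blk then edges_p ++ [(li.1, li.2, j)] else edges_p) edges_p
      else edges_p) edges_p) []]
  apply PySem.List.foldl_congr_mem
  intro acc blk _
  exact block_eq n_input n_neurons blk acc
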